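-- pv_equiv track=rewrite | github.com/ja153903/start-thinking-more | advent_of_code/yr2024/day7/main.py | backtrack_with_concat
-- ===== SOURCE A (Python) =====
-- def backtrack_with_concat(
--     current: int, numbers: list[int], index: int, target: int
-- ) -> bool:
--     if index == len(numbers):
--         return current == target
--
--     return (
--         backtrack_with_concat(current + numbers[index], numbers, index + 1, target)
--         or backtrack_with_concat(current * numbers[index], numbers, index + 1, target)
--         or backtrack_with_concat(
--             int(f"{current}{numbers[index]}"), numbers, index + 1, target
--         )
--     )
-- ===== SOURCE B (Python) =====
-- def backtrack_with_concat(
--     current: int, numbers: list[int], index: int, target: int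
-- ) -> bool:
--     frontier = {current}
--     for num in numbers[index:]:
--         nxt = set()
--         for v in frontier:
--             nxt.add(v + num)
--             nxt.add(v * num)
--             nxt.add(int(f"{v}{num}"))
--         frontier = nxt
--     return target in frontier
-- ===== Notes on version B (the rewrite author's own statement) =====
-- stated objective: alternative
-- what changed: Replaces the triple-branch recursion by an iterative breadth-first frontier: a set of all values reachable after each prefix, folded over numbers[index:], with membership of target decided at the end.
-- outside the precondition, e.g. on backtrack_with_concat(0, [2, -1], 0, 1): A returns True, B raises ValueError; on backtrack_with_concat(0, [1, 2], -1, 5): A returns True, B returns False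
import Mathlib
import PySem

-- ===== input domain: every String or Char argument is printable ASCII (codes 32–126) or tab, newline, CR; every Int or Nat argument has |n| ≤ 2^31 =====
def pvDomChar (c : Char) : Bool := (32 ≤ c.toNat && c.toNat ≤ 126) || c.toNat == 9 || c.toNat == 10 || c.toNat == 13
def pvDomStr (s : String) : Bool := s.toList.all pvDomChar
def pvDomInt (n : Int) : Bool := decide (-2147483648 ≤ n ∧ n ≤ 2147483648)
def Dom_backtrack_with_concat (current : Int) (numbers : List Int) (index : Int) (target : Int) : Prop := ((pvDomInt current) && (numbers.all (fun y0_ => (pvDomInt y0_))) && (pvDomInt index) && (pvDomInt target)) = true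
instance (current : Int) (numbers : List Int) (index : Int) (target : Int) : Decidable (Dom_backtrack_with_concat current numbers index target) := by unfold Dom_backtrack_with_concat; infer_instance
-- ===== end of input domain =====

-- B replaces A's triple-branch recursion by an iterative frontier set of reachable values (objective: alternative decomposition).

-- ===== PORT A =====
-- int(f"{current}{numbers[index]}") — none is Python's ValueError
def pvConcatA (a b : Int) : Option Int :=
  PySem.Int.ofStr? (PySem.Int.toStr a ++ PySem.Int.toStr b)

def backtrack_with_concat (current : Int) (numbers : List Int) (index : Int) (target : Int) : Bool :=
  if index = (numbers.length : Int) then current == target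
  else
    match hg : PySem.List.pyGet? numbers index with
    | none => false  -- IndexError (outside Pre_)
    | some n =>
      if backtrack_with_concat (current + n) numbers (index + 1) target then true
      else if backtrack_with_concat (current * n) numbers (index + 1) target then true
      else
        match pvConcatA current n with
        | none => false  -- ValueError (outside Pre_)
        | some c => backtrack_with_concat c numbers (index + 1) target
termination_by ((numbers.length : Int) + 1 - index).toNat
decreasing_by
  all_goals
    have hin : PySem.Raise.InRange numbers.length index := by
      by_contra hc
      have hnone := (PySem.List.pyGet?_eq_none_iff numbers index).mpr hc
      rw [hnone] at hg
      cases hg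
    simp only [PySem.Raise.InRange] at hin
    omega

-- ===== PORT B =====
-- one step of the frontier: nxt = {v+num, v*num, int(f"{v}{num}") : v ∈ frontier}
def pvStepB (num : Int) (frontier : PySem.Set Int) : PySem.Set Int :=
  frontier.foldl (fun nxt v =>
    let nxt := PySem.Set.add nxt (v + num)
    let nxt := PySem.Set.add nxt (v * num)
    match pvConcatA v num with
    | some c => PySem.Set.add nxt c
    | none => nxt) PySem.Set.empty

def backtrack_with_concat_alt (current : Int) (numbers : List Int) (index : Int) (target : Int) : Bool :=
  let frontier :=
    (PySem.List.slice numbers (some index) none).foldl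
      (fun fr num => pvStepB num fr) (PySem.Set.ofList [current])
  PySem.Set.contains frontier target

-- ===== PRECONDITION & SPEC =====
-- Pre_ keeps the helper's natural domain: a forward index into the list (A relies on Python's
-- negative-index wraparound outside it, and raises IndexError past either end) and a nonnegative
-- suffix (a negative numbers[i] makes int(f"{v}{num}") raise ValueError on some branch; A only
-- returns on such inputs when an earlier `or` branch short-circuits to True, while B evaluates
-- all branches eagerly and raises).
def Pre_backtrack_with_concat (current : Int) (numbers : List Int) (index : Int) (target : Int) : Prop :=
  0 ≤ index ∧ index ≤ (numbers.length : Int) ∧ ∀ n ∈ numbers.drop index.toNat, 0 ≤ n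
instance (current : Int) (numbers : List Int) (index : Int) (target : Int) : Decidable (Pre_backtrack_with_concat current numbers index target) := by unfold Pre_backtrack_with_concat; infer_instance

def pvWitness_backtrack_with_concat : Int × List Int × Int × Int := (0, [2, 3, 1], 0, 7)

def Spec_backtrack_with_concat (current : Int) (numbers : List Int) (index : Int) (target : Int) (out : Bool) : Prop := out = backtrack_with_concat_alt current numbers index target
instance (current : Int) (numbers : List Int) (index : Int) (target : Int) (out : Bool) : Decidable (Spec_backtrack_with_concat current numbers index target out) := by unfold Spec_backtrack_with_concat; infer_instance

-- ===== CLAIM (what is proved, stated in full; the proofs are below) =====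
def Claim_equal_backtrack_with_concat : Prop := ∀ (current : Int) (numbers : List Int) (index : Int) (target : Int), Dom_backtrack_with_concat current numbers index target → Pre_backtrack_with_concat current numbers index target → Spec_backtrack_with_concat current numbers index target (backtrack_with_concat current numbers index target)

-- ===== LEMMAS AND PROOFS =====

-- structural restatement of A's recursion over the suffix list (proof device)
def pvGoA (c : Int) (l : List Int) (t : Int) : Bool :=
  match l with
  | [] => c == t
  | n :: l' =>
    if pvGoA (c + n) l' t then true
    else if pvGoA (c * n) l' t then true
    else
      match pvConcatA c n with
      | none => false
      | some cc => pvGoA cc l' t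

theorem pvA_eq_goA (l : List Int) : ∀ (c index t : Int) (numbers : List Int),
    0 ≤ index → index ≤ (numbers.length : Int) → numbers.drop index.toNat = l →
    backtrack_with_concat c numbers index t = pvGoA c l t := by
  induction l with
  | nil =>
    intro c index t numbers h0 hle hd
    have : index = (numbers.length : Int) := by
      have := List.drop_eq_nil_iff.mp hd; omega
    rw [backtrack_with_concat, if_pos this, pvGoA]
  | cons n l' ih =>
    intro c index t numbers h0 hle hd
    have hlt : index < (numbers.length : Int) := by
      by_contra h
      have : index = (numbers.length : Int) := by omega
      rw [this] at hd; simp at hd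
    have hne : index ≠ (numbers.length : Int) := by omega
    have hget : PySem.List.pyGet? numbers index = some n := by
      rw [PySem.List.pyGet?_of_nonneg numbers h0]
      have : numbers.drop index.toNat ≠ [] := by rw [hd]; simp
      have hlen : index.toNat < numbers.length := by omega
      have h2 : (numbers.drop index.toNat)[0]? = some n := by rw [hd]; rfl
      rw [List.getElem?_drop] at h2
      simpa using h2
    have hd' : numbers.drop (index + 1).toNat = l' := by
      have h1 : (index + 1).toNat = index.toNat + 1 := by omega
      rw [h1, ← List.drop_drop, hd]; simp
    rw [backtrack_with_concat, if_neg hne, hget]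
    simp only
    rw [ih (c + n) (index + 1) t numbers (by omega) (by omega) hd',
        ih (c * n) (index + 1) t numbers (by omega) (by omega) hd']
    rw [pvGoA]
    cases hcc : pvConcatA c n with
    | none => simp
    | some cc =>
      simp only []
      rw [ih cc (index + 1) t numbers (by omega) (by omega) hd']

-- membership in one frontier step
theorem pvMem_step_aux (num : Int) (S : List Int) (acc : PySem.Set Int) (x : Int) :
    x ∈ S.foldl (fun nxt v =>
      let nxt := PySem.Set.add nxt (v + num)
      let nxt := PySem.Set.add nxt (v * num)
      match pvConcatA v num with
      | some c => PySem.Set.add nxt c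
      | none => nxt) acc ↔
    x ∈ acc ∨ ∃ v ∈ S, x = v + num ∨ x = v * num ∨ pvConcatA v num = some x := by
  induction S generalizing acc with
  | nil => simp
  | cons v S ih =>
    rw [List.foldl_cons, ih]
    cases hcc : pvConcatA v num with
    | none =>
      simp only [PySem.Set.mem_add]
      constructor
      · rintro (((h | h) | h) | ⟨w, hw, h⟩)
        · exact Or.inl h
        · exact Or.inr ⟨v, by simp, Or.inl h⟩
        · exact Or.inr ⟨v, by simp, Or.inr (Or.inl h)⟩
        · exact Or.inr ⟨w, by simp [hw], h⟩
      · rintro (h | ⟨w, hw, h⟩)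
        · exact Or.inl (Or.inl (Or.inl h))
        · rcases List.mem_cons.mp hw with rfl | hw
          · rcases h with h | h | h
            · exact Or.inl (Or.inl (Or.inr h))
            · exact Or.inl (Or.inr h)
            · rw [hcc] at h; cases h
          · exact Or.inr ⟨w, hw, h⟩
    | some cc =>
      simp only [PySem.Set.mem_add]
      constructor
      · rintro ((((h | h) | h) | h) | ⟨w, hw, h⟩)
        · exact Or.inl h
        · exact Or.inr ⟨v, by simp, Or.inl h⟩
        · exact Or.inr ⟨v, by simp, Or.inr (Or.inl h)⟩
        · exact Or.inr ⟨v, by simp, Or.inr (Or.inr (by rw [hcc, h]))⟩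
        · exact Or.inr ⟨w, by simp [hw], h⟩
      · rintro (h | ⟨w, hw, h⟩)
        · exact Or.inl (Or.inl (Or.inl (Or.inl h)))
        · rcases List.mem_cons.mp hw with rfl | hw
          · rcases h with h | h | h
            · exact Or.inl (Or.inl (Or.inl (Or.inr h)))
            · exact Or.inl (Or.inl (Or.inr h))
            · rw [hcc] at h; exact Or.inl (Or.inr (Option.some_inj.mp h).symm)
          · exact Or.inr ⟨w, hw, h⟩

theorem pvMem_step (num : Int) (S : PySem.Set Int) (x : Int) :
    x ∈ pvStepB num S ↔ ∃ v ∈ S, x = v + num ∨ x = v * num ∨ pvConcatA v num = some x := by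
  unfold pvStepB
  rw [pvMem_step_aux]
  simp [PySem.Set.empty]

-- unfolding one pvGoA step as a disjunction
theorem pvGoA_cons (c n t : Int) (l : List Int) :
    pvGoA c (n :: l) t = true ↔
      pvGoA (c + n) l t = true ∨ pvGoA (c * n) l t = true ∨
      ∃ cc, pvConcatA c n = some cc ∧ pvGoA cc l t = true := by
  rw [pvGoA]
  cases hcc : pvConcatA c n with
  | none => simp
  | some cc => simp

-- frontier invariant: target is in the folded frontier iff some seed reaches it via pvGoA
theorem pvFold_mem (l : List Int) : ∀ (S : PySem.Set Int) (t : Int),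
    (t ∈ l.foldl (fun fr num => pvStepB num fr) S) ↔ ∃ v ∈ S, pvGoA v l t = true := by
  induction l with
  | nil =>
    intro S t
    simp only [List.foldl_nil, pvGoA]
    constructor
    · intro h; exact ⟨t, h, by simp⟩
    · rintro ⟨v, hv, h⟩; simp at h; exact h ▸ hv
  | cons n l ih =>
    intro S t
    rw [List.foldl_cons, ih]
    constructor
    · rintro ⟨w, hw, h⟩
      rcases (pvMem_step n S w).mp hw with ⟨v, hv, rfl | rfl | hcc⟩
      · exact ⟨v, hv, (pvGoA_cons v n t l).mpr (Or.inl h)⟩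
      · exact ⟨v, hv, (pvGoA_cons v n t l).mpr (Or.inr (Or.inl h))⟩
      · exact ⟨v, hv, (pvGoA_cons v n t l).mpr (Or.inr (Or.inr ⟨w, hcc, h⟩))⟩
    · rintro ⟨v, hv, h⟩
      rcases (pvGoA_cons v n t l).mp h with h | h | ⟨cc, hcc, h⟩
      · exact ⟨v + n, (pvMem_step n S _).mpr ⟨v, hv, Or.inl rfl⟩, h⟩
      · exact ⟨v * n, (pvMem_step n S _).mpr ⟨v, hv, Or.inr (Or.inl rfl)⟩, h⟩
      · exact ⟨cc, (pvMem_step n S _).mpr ⟨v, hv, Or.inr (Or.inr hcc)⟩, h⟩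

-- ===== VERDICT (by name: the statement is the Claim_ definition above) =====
theorem backtrack_with_concat_spec : Claim_equal_backtrack_with_concat := by
  intro current numbers index target _ hpre
  rcases hpre with ⟨h0, hle, _⟩
  unfold Spec_backtrack_with_concat
  simp only [backtrack_with_concat_alt]
  rw [PySem.List.slice_from numbers h0]
  rw [pvA_eq_goA (numbers.drop index.toNat) current index target numbers h0 hle rfl]
  have hs : (PySem.Set.ofList [current] : PySem.Set Int) = [current] := rfl
  rw [hs, Bool.eq_iff_iff, PySem.Set.contains_iff,
      pvFold_mem (numbers.drop index.toNat) [current] target]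
  simp
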